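-- pv_equiv track=rewrite | github.com/Mariani-code/PythonProjects | ProjectEuler/EP212.py | make_all_cuboids
-- ===== SOURCE A (Python) =====
-- def gen():
--     s = []
--     k = 1
--     while True:
--         if k <= 55:
--             s.append((100003 - 200003*k + 300007*k*k*k) % 1000000)
--             k += 1
--         else:
--             s.append((s[-24] + s[-55]) % 1000000)
--             s.pop(0)
--         yield s[-1]
--
-- def make_all_cuboids(n):
--     num = gen()
--     cuboids = []
--     for i in range(n):
--         x0, y0, z0 = next(num) % 10000, next(num) % 10000, next(num) % 10000
--         x1, y1, z1 = x0 + 1 + next(num) % 399, y0 + 1 + next(num) % 399, z0 + 1 + next(num) % 399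
--         cuboids.append((x0, x1, y0, y1, z0, z1))
--     cuboids.sort()
--     return cuboids
-- ===== SOURCE B (Python) =====
-- def make_all_cuboids(n):
--     # Top-down memoized recurrence: the t-th draw (0-based) is a pure function
--     # d(t) of its index, looked up at random access, instead of A's stateful
--     # sliding-window generator consumed in sequence.
--     memo = {}
--
--     def d(t):
--         if t in memo:
--             return memo[t]
--         if t < 55:
--             v = (100003 - 200003 * (t + 1) + 300007 * (t + 1) ** 3) % 1000000
--         else:
--             v = (d(t - 24) + d(t - 55)) % 1000000
--             del memo[t - 55]    # nothing ever looks back more than 55 draws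
--         memo[t] = v
--         return v
--
--     def cuboid(i):
--         b = 6 * i
--         x0, y0, z0 = d(b) % 10000, d(b + 1) % 10000, d(b + 2) % 10000
--         return (x0, x0 + 1 + d(b + 3) % 399,
--                 y0, y0 + 1 + d(b + 4) % 399,
--                 z0, z0 + 1 + d(b + 5) % 399)
--
--     return sorted(cuboid(i) for i in range(n))
-- ===== Notes on version B (the rewrite author's own statement) =====
-- stated objective: alternative
-- what changed: Replaced A's stateful sliding-window generator (growing list, negative indexing, pop(0), consumed strictly in sequence) by a pure index-addressed draw function d(t) with a closed-form seed and top-down memoized recursion (the memo evicts entries older than the recurrence window), from which each cuboid is built directly from its six consecutive draws; same final sort.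
import Mathlib
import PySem

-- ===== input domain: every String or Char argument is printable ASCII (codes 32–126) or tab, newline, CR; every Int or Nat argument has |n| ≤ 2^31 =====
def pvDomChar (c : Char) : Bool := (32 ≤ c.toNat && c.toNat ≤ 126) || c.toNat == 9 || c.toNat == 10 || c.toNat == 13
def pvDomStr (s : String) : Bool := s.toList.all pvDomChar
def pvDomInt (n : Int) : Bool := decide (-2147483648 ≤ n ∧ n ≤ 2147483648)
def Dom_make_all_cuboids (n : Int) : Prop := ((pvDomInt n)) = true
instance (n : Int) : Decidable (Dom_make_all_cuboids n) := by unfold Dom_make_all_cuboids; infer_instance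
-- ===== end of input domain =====

-- B replaces A's stateful sliding-window generator by a pure index-addressed draw
-- function with top-down memoized recursion (objective: alternative algorithm, same cost).

-- ===== PORT A =====
-- Python's list.sort()/sorted() on 6-tuples of ints: a STABLE merge sort by the
-- exact lexicographic tuple order (shared by both ports; structural fuel so the
-- kernel can evaluate it)
def pvLexLE (c d : Int × Int × Int × Int × Int × Int) : Bool :=
  if c.1 ≠ d.1 then c.1 < d.1
  else if c.2.1 ≠ d.2.1 then c.2.1 < d.2.1
  else if c.2.2.1 ≠ d.2.2.1 then c.2.2.1 < d.2.2.1
  else if c.2.2.2.1 ≠ d.2.2.2.1 then c.2.2.2.1 < d.2.2.2.1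
  else if c.2.2.2.2.1 ≠ d.2.2.2.2.1 then c.2.2.2.2.1 < d.2.2.2.2.1
  else c.2.2.2.2.2 ≤ d.2.2.2.2.2

def pvMerge : Nat → List (Int × Int × Int × Int × Int × Int) →
    List (Int × Int × Int × Int × Int × Int) → List (Int × Int × Int × Int × Int × Int)
  | 0, xs, ys => xs ++ ys
  | _ + 1, [], ys => ys
  | _ + 1, x :: xs, [] => x :: xs
  | n + 1, x :: xs, y :: ys =>
      if pvLexLE x y then x :: pvMerge n xs (y :: ys) else y :: pvMerge n (x :: xs) ys

def pvMSort : Nat → List (Int × Int × Int × Int × Int × Int) →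
    List (Int × Int × Int × Int × Int × Int)
  | 0, l => l
  | n + 1, l =>
      match l with
      | [] => []
      | [c] => [c]
      | l =>
          let k := l.length / 2
          pvMerge l.length (pvMSort n (l.take k)) (pvMSort n (l.drop k))

-- the stable sort both Pythons perform
def pvSortCuboids (l : List (Int × Int × Int × Int × Int × Int)) :
    List (Int × Int × Int × Int × Int × Int) := pvMSort l.length l

-- one call of next(num) on A's generator: state = (s, k)
def pvGenNext (st : List Int × Int) : Int × (List Int × Int) :=
  let (s, k) := st
  if k ≤ 55 then
    let s' := s ++ [PySem.Int.mod (100003 - 200003 * k + 300007 * k * k * k) 1000000]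
    (PySem.List.pyGetD s' (-1) 0, (s', k + 1))    -- yield s[-1]; in-range by construction
  else
    let v := PySem.Int.mod (PySem.List.pyGetD s (-24) 0 + PySem.List.pyGetD s (-55) 0) 1000000
    let s' := (s ++ [v]).drop 1                    -- append then s.pop(0)
    (PySem.List.pyGetD s' (-1) 0, (s', k))

-- one iteration of A's `for i in range(n)` loop (the body does not use i)
def pvStepA (st : (List Int × Int) × List (Int × Int × Int × Int × Int × Int)) :
    (List Int × Int) × List (Int × Int × Int × Int × Int × Int) :=
  let (g0, cub) := st
  let (a, g1) := pvGenNext g0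
  let (b, g2) := pvGenNext g1
  let (c, g3) := pvGenNext g2
  let (d, g4) := pvGenNext g3
  let (e, g5) := pvGenNext g4
  let (f, g6) := pvGenNext g5
  let x0 := PySem.Int.mod a 10000
  let y0 := PySem.Int.mod b 10000
  let z0 := PySem.Int.mod c 10000
  let x1 := x0 + 1 + PySem.Int.mod d 399
  let y1 := y0 + 1 + PySem.Int.mod e 399
  let z1 := z0 + 1 + PySem.Int.mod f 399
  (g6, (x0, x1, y0, y1, z0, z1) :: cub)

def make_all_cuboids (n : Int) : List (Int × Int × Int × Int × Int × Int) :=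
  let (_, cuboidsRev) := (PySem.List.pyRange 0 n 1).foldl (fun st _ => pvStepA st) (([], 1), [])
  pvSortCuboids cuboidsRev.reverse

-- ===== PORT B =====
-- Source B's memoized draw function d(t): the memo dict is threaded through as state
-- (Python ints as keys → Dict Int Int; d is only ever called on naturals, so the
-- index argument is a Nat, cast to Int for the dict keys).
def pvDMemo (memo : PySem.Dict Int Int) (t : Nat) : Int × PySem.Dict Int Int :=
  match memo.get? (t : Int) with
  | some v => (v, memo)                        -- `if t in memo: return memo[t]`
  | none =>
    if t < 55 then
      let v := PySem.Int.mod (100003 - 200003 * ((t : Int) + 1)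
        + 300007 * ((t : Int) + 1) ^ 3) 1000000
      (v, memo.insert (t : Int) v)
    else
      let r1 := pvDMemo memo (t - 24)
      let r2 := pvDMemo r1.2 (t - 55)
      let v := PySem.Int.mod (r1.1 + r2.1) 1000000
      -- `del memo[t - 55]` then `memo[t] = v`
      (v, (r2.2.erase ((t : Int) - 55)).insert (t : Int) v)
  termination_by t
  decreasing_by all_goals omega

-- Source B's cuboid(i): six memoized draws at indices 6i..6i+5, in source order
def pvCuboidB (memo : PySem.Dict Int Int) (i : Nat) :
    (Int × Int × Int × Int × Int × Int) × PySem.Dict Int Int :=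
  let b := 6 * i
  let r0 := pvDMemo memo b
  let r1 := pvDMemo r0.2 (b + 1)
  let r2 := pvDMemo r1.2 (b + 2)
  let r3 := pvDMemo r2.2 (b + 3)
  let r4 := pvDMemo r3.2 (b + 4)
  let r5 := pvDMemo r4.2 (b + 5)
  let x0 := PySem.Int.mod r0.1 10000
  let y0 := PySem.Int.mod r1.1 10000
  let z0 := PySem.Int.mod r2.1 10000
  ((x0, x0 + 1 + PySem.Int.mod r3.1 399,
    y0, y0 + 1 + PySem.Int.mod r4.1 399,
    z0, z0 + 1 + PySem.Int.mod r5.1 399), r5.2)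

-- one step of the `cuboid(i) for i in range(n)` pass (i ≥ 0 on every loop index)
def pvStepB (st : List (Int × Int × Int × Int × Int × Int) × PySem.Dict Int Int) (i : Int) :
    List (Int × Int × Int × Int × Int × Int) × PySem.Dict Int Int :=
  let r := pvCuboidB st.2 i.toNat
  (st.1 ++ [r.1], r.2)

def make_all_cuboids_alt (n : Int) : List (Int × Int × Int × Int × Int × Int) :=
  let res := (PySem.List.pyRange 0 n 1).foldl pvStepB ([], PySem.Dict.empty)
  pvSortCuboids res.1

-- ===== PRECONDITION & SPEC =====
def Spec_make_all_cuboids (n : Int) (out : List (Int × Int × Int × Int × Int × Int)) : Prop := out = make_all_cuboids_alt n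
instance (n : Int) (out : List (Int × Int × Int × Int × Int × Int)) : Decidable (Spec_make_all_cuboids n out) := by unfold Spec_make_all_cuboids; infer_instance

-- ===== CLAIM (what is proved, stated in full; the proofs are below) =====
def Claim_equal_make_all_cuboids : Prop := ∀ (n : Int), Dom_make_all_cuboids n → Spec_make_all_cuboids n (make_all_cuboids n)

-- ===== LEMMAS AND PROOFS =====

-- the mathematical draw sequence: seeds for t < 55, lagged Fibonacci after
def pvD : Nat → Int
  | t =>
    if h : t < 55 then
      PySem.Int.mod (100003 - 200003 * ((t : Int) + 1)
        + 300007 * ((t : Int) + 1) * ((t : Int) + 1) * ((t : Int) + 1)) 1000000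
    else
      PySem.Int.mod (pvD (t - 24) + pvD (t - 55)) 1000000
  termination_by t => t
  decreasing_by all_goals omega

lemma pvD_lt {t : Nat} (h : t < 55) :
    pvD t = PySem.Int.mod (100003 - 200003 * ((t : Int) + 1)
      + 300007 * ((t : Int) + 1) * ((t : Int) + 1) * ((t : Int) + 1)) 1000000 := by
  rw [pvD]; simp [h]

lemma pvD_ge {t : Nat} (h : 55 ≤ t) :
    pvD t = PySem.Int.mod (pvD (t - 24) + pvD (t - 55)) 1000000 := by
  rw [pvD]; simp [Nat.not_lt.2 h]

-- A's generator state after t draws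
def pvSt (t : Nat) : List Int × Int :=
  ((List.range' (t - min t 55) (min t 55)).map pvD, ((min t 55 : Nat) : Int) + 1)

lemma pvGenNext_spec (t : Nat) : pvGenNext (pvSt t) = (pvD t, pvSt (t + 1)) := by
  by_cases h : t < 55
  · have hm : min t 55 = t := by omega
    have hm1 : min (t + 1) 55 = t + 1 := by omega
    have hk : ((t : Nat) : Int) + 1 ≤ 55 := by omega
    have hcat : (List.range' 0 t).map pvD ++ [pvD t] = (List.range' 0 (t + 1)).map pvD := by
      rw [List.range'_concat]; simp
    simp only [pvGenNext, pvSt, hm, hm1, Nat.sub_self, if_pos hk, ← pvD_lt h,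
      PySem.List.pyGetD_neg_one_append_singleton]
    rw [hcat]
    refine Prod.ext rfl (Prod.ext rfl ?_)
    push_cast; ring
  · have h55 : 55 ≤ t := by omega
    have hm : min t 55 = 55 := by omega
    have hm1 : min (t + 1) 55 = 55 := by omega
    have hk : ¬ ((55 : Nat) : Int) + 1 ≤ 55 := by omega
    have hget24 : PySem.List.pyGetD ((List.range' (t - 55) 55).map pvD) (-24) 0 = pvD (t - 24) := by
      rw [PySem.List.pyGetD_neg_ofNat _ 24 0 (by omega) (by simp)]
      simp only [List.length_map, List.length_range', List.getElem_map, List.getElem_range'_1]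
      congr 1; omega
    have hget55 : PySem.List.pyGetD ((List.range' (t - 55) 55).map pvD) (-55) 0 = pvD (t - 55) := by
      rw [PySem.List.pyGetD_neg_ofNat _ 55 0 (by omega) (by simp)]
      simp only [List.length_map, List.length_range', List.getElem_map, List.getElem_range'_1]
      congr 1
    have hv : PySem.Int.mod (PySem.List.pyGetD ((List.range' (t - 55) 55).map pvD) (-24) 0
        + PySem.List.pyGetD ((List.range' (t - 55) 55).map pvD) (-55) 0) 1000000 = pvD t := by
      rw [hget24, hget55, ← pvD_ge h55]
    have hdecomp : (List.range' (t - 55) 55).map pvD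
        = pvD (t - 55) :: (List.range' (t - 54) 54).map pvD := by
      rw [show (55 : Nat) = 54 + 1 from rfl, List.range'_succ,
        show t - 55 + 1 = t - 54 from by omega]
      simp
    have hcat : (List.range' (t - 54) 54).map pvD ++ [pvD t] = (List.range' (t - 54) 55).map pvD := by
      conv_rhs => rw [show (55 : Nat) = 54 + 1 from rfl, List.range'_concat]
      rw [show t - 54 + 1 * 54 = t from by omega]
      simp
    have h54 : t + 1 - 55 = t - 54 := by omega
    simp only [pvGenNext, pvSt, hm, hm1, if_neg hk, h54]
    rw [hv, hdecomp]
    simp only [List.cons_append, List.drop_succ_cons, List.drop_zero,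
      PySem.List.pyGetD_neg_one_append_singleton]
    rw [hcat]

def pvTuple (g : Nat → Int) (s : Nat) : Int × Int × Int × Int × Int × Int :=
  (PySem.Int.mod (g s) 10000,
   PySem.Int.mod (g s) 10000 + 1 + PySem.Int.mod (g (s + 3)) 399,
   PySem.Int.mod (g (s + 1)) 10000,
   PySem.Int.mod (g (s + 1)) 10000 + 1 + PySem.Int.mod (g (s + 4)) 399,
   PySem.Int.mod (g (s + 2)) 10000,
   PySem.Int.mod (g (s + 2)) 10000 + 1 + PySem.Int.mod (g (s + 5)) 399)

-- A builds its cuboids by consuming the draws six at a time, in order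
def pvChunk6 : List Int → List (Int × Int × Int × Int × Int × Int)
  | x0 :: y0 :: z0 :: dx :: dy :: dz :: rest =>
      (PySem.Int.mod x0 10000, PySem.Int.mod x0 10000 + 1 + PySem.Int.mod dx 399,
       PySem.Int.mod y0 10000, PySem.Int.mod y0 10000 + 1 + PySem.Int.mod dy 399,
       PySem.Int.mod z0 10000, PySem.Int.mod z0 10000 + 1 + PySem.Int.mod dz 399) :: pvChunk6 rest
  | _ => []

lemma pvRange'_six (s m : Nat) : List.range' s (6 * m + 6)
    = s :: (s + 1) :: (s + 2) :: (s + 3) :: (s + 4) :: (s + 5) :: List.range' (s + 6) (6 * m) := by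
  rw [show 6 * m + 6 = 6 + 6 * m from by omega, ← List.range'_append,
    show s + 1 * 6 = s + 6 from by omega]
  simp only [List.range', List.cons_append, List.nil_append]

lemma pvChunk6_range' (s m : Nat) :
    pvChunk6 ((List.range' s (6 * m + 6)).map pvD)
      = pvTuple pvD s :: pvChunk6 ((List.range' (s + 6) (6 * m)).map pvD) := by
  rw [pvRange'_six]
  simp only [List.map_cons, pvChunk6, pvTuple]

lemma pvStepA_spec (t : Nat) (acc : List (Int × Int × Int × Int × Int × Int)) :
    pvStepA (pvSt t, acc) = (pvSt (t + 6), pvTuple pvD t :: acc) := by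
  simp only [pvStepA, pvGenNext_spec, pvTuple,
    show t + 1 + 1 = t + 2 from by omega, show t + 2 + 1 = t + 3 from by omega,
    show t + 3 + 1 = t + 4 from by omega, show t + 4 + 1 = t + 5 from by omega,
    show t + 5 + 1 = t + 6 from by omega]

lemma pvIterA (m : Nat) : ∀ (t : Nat) (acc : List (Int × Int × Int × Int × Int × Int)),
    pvStepA^[m] (pvSt t, acc)
      = (pvSt (t + 6 * m), (pvChunk6 ((List.range' t (6 * m)).map pvD)).reverse ++ acc) := by
  induction m with
  | zero => intro t acc; simp [pvChunk6]
  | succ m ih =>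
    intro t acc
    rw [Function.iterate_succ_apply, pvStepA_spec, ih (t + 6)]
    rw [show 6 * (m + 1) = 6 * m + 6 from by omega, pvChunk6_range',
      show t + 6 + 6 * m = t + (6 * m + 6) from by omega]
    simp [List.append_assoc]

lemma pvFoldl_ignore {α β : Type} (g : α → α) (l : List β) (init : α) :
    l.foldl (fun s _ => g s) init = g^[l.length] init := by
  induction l generalizing init with
  | nil => rfl
  | cons x xs ih => simp [List.foldl_cons, ih, Function.iterate_succ_apply]

-- B-side invariant: every memoized value is the true draw at its index
def pvGood (m : PySem.Dict Int Int) : Prop :=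
  ∀ (k : Nat) (v : Int), m.get? (k : Int) = some v → v = pvD k

lemma pvGood_empty : pvGood PySem.Dict.empty := by
  intro k v h
  simp [PySem.Dict.get?_empty] at h

lemma pvFind_erase : ∀ (l : List (Int × Int)) (x k : Int) (a : Int × Int),
    (l.filter (fun p => !(p.1 == x))).find? (fun p => p.1 == k) = some a →
    l.find? (fun p => p.1 == k) = some a := by
  intro l x k a
  induction l with
  | nil => simp
  | cons p rest ih =>
    intro h
    by_cases hx : p.1 = x
    · rw [List.filter_cons_of_neg (by simp [hx])] at h
      have ha : a.1 = k := by simpa using List.find?_some h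
      have hax : ¬ a.1 = x := by
        simpa using (List.mem_filter.mp (List.mem_of_find?_eq_some h)).2
      have hpk : ¬ p.1 = k := fun hk => hax (by rw [ha, ← hk, hx])
      rw [List.find?_cons_of_neg (by simp [hpk])]
      exact ih h
    · rw [List.filter_cons_of_pos (by simp [hx])] at h
      by_cases hk : p.1 = k
      · rw [List.find?_cons_of_pos (by simp [hk])] at h ⊢
        exact h
      · rw [List.find?_cons_of_neg (by simp [hk])] at h ⊢
        exact ih h

lemma pvGood_erase {m : PySem.Dict Int Int} (hg : pvGood m) (x : Int) :
    pvGood (m.erase x) := by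
  intro k v h
  apply hg k v
  simp only [PySem.Dict.erase, PySem.Dict.get?] at h ⊢
  obtain ⟨p, hp, hv⟩ := Option.map_eq_some_iff.mp h
  exact Option.map_eq_some_iff.mpr ⟨p, pvFind_erase _ x k p hp, hv⟩

lemma pvGood_insert {m : PySem.Dict Int Int} (hg : pvGood m) (t : Nat) :
    pvGood (m.insert (t : Int) (pvD t)) := by
  intro k v h
  rw [PySem.Dict.get?_insert] at h
  split at h
  · rename_i he
    have hk : k = t := by exact_mod_cast he
    subst hk
    injection h with h'
    exact h'.symm
  · exact hg k v h

lemma pvDMemo_spec (t : Nat) : ∀ (memo : PySem.Dict Int Int), pvGood memo →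
    (pvDMemo memo t).1 = pvD t ∧ pvGood (pvDMemo memo t).2 := by
  induction t using Nat.strong_induction_on with
  | _ t ih =>
    intro memo hg
    rw [pvDMemo]
    cases hm : memo.get? (t : Int) with
    | some v => exact ⟨hg t v hm, hg⟩
    | none =>
      by_cases h : t < 55
      · simp only [if_pos h]
        have hv : PySem.Int.mod (100003 - 200003 * ((t : Int) + 1)
            + 300007 * ((t : Int) + 1) ^ 3) 1000000 = pvD t := by
          rw [pvD_lt h]; ring_nf
        refine ⟨hv, ?_⟩
        rw [hv]
        exact pvGood_insert hg t
      · have h55 : 55 ≤ t := by omega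
        simp only [if_neg h]
        obtain ⟨h1v, h1g⟩ := ih (t - 24) (by omega) memo hg
        obtain ⟨h2v, h2g⟩ := ih (t - 55) (by omega) _ h1g
        have hv : PySem.Int.mod ((pvDMemo memo (t - 24)).1
            + (pvDMemo (pvDMemo memo (t - 24)).2 (t - 55)).1) 1000000 = pvD t := by
          rw [h1v, h2v, ← pvD_ge h55]
        exact ⟨hv, by rw [hv]; exact pvGood_insert (pvGood_erase h2g _) t⟩

lemma pvCuboidB_spec (memo : PySem.Dict Int Int) (i : Nat) (hg : pvGood memo) :
    (pvCuboidB memo i).1 = pvTuple pvD (6 * i) ∧ pvGood (pvCuboidB memo i).2 := by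
  obtain ⟨e0, g0⟩ := pvDMemo_spec (6 * i) memo hg
  obtain ⟨e1, g1⟩ := pvDMemo_spec (6 * i + 1) _ g0
  obtain ⟨e2, g2⟩ := pvDMemo_spec (6 * i + 2) _ g1
  obtain ⟨e3, g3⟩ := pvDMemo_spec (6 * i + 3) _ g2
  obtain ⟨e4, g4⟩ := pvDMemo_spec (6 * i + 4) _ g3
  obtain ⟨e5, g5⟩ := pvDMemo_spec (6 * i + 5) _ g4
  exact ⟨by simp only [pvCuboidB, pvTuple, e0, e1, e2, e3, e4, e5], g5⟩

lemma pvFoldB (l : List Int) : ∀ (acc : List (Int × Int × Int × Int × Int × Int))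
    (memo : PySem.Dict Int Int), pvGood memo →
    (l.foldl pvStepB (acc, memo)).1 = acc ++ l.map (fun i => pvTuple pvD (6 * i.toNat)) := by
  induction l with
  | nil => intro acc memo _; simp
  | cons i rest ih =>
    intro acc memo hg
    obtain ⟨hc, hg'⟩ := pvCuboidB_spec memo i.toNat hg
    rw [List.foldl_cons, show pvStepB (acc, memo) i
        = (acc ++ [pvTuple pvD (6 * i.toNat)], (pvCuboidB memo i.toNat).2) from by
      simp only [pvStepB, hc], ih _ _ hg']
    simp [List.append_assoc]

lemma pvChunk6_map (m : Nat) : ∀ (s : Nat),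
    pvChunk6 ((List.range' s (6 * m)).map pvD)
      = (List.range m).map (fun i => pvTuple pvD (s + 6 * i)) := by
  induction m with
  | zero => intro s; simp [pvChunk6]
  | succ m ih =>
    intro s
    rw [show 6 * (m + 1) = 6 * m + 6 from by omega, pvChunk6_range', ih (s + 6),
      List.range_succ_eq_map]
    simp only [List.map_cons, List.map_map, Nat.mul_zero, Nat.add_zero]
    congr 1
    apply List.map_congr_left
    intro j _
    simp only [Function.comp_apply]
    congr 1
    omega

-- ===== VERDICT (by name: the statement is the Claim_ definition above) =====
theorem make_all_cuboids_spec : Claim_equal_make_all_cuboids := by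
  intro n _
  unfold Spec_make_all_cuboids make_all_cuboids make_all_cuboids_alt
  have hst0 : ((([] : List Int), (1 : Int)),
      ([] : List (Int × Int × Int × Int × Int × Int))) = (pvSt 0, []) := by
    simp [pvSt]
  rw [hst0, pvFoldl_ignore pvStepA, PySem.List.length_pyRange_one, pvIterA]
  dsimp only
  rw [pvFoldB _ _ _ pvGood_empty]
  simp only [List.append_nil, List.nil_append, List.reverse_reverse, Nat.zero_add,
    pvChunk6_map]
  congr 1
  rw [PySem.List.pyRange_one, List.map_map]
  apply List.map_congr_left
  intro j _
  simp only [Function.comp_apply]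
  congr 2
  omega
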